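-- pv_equiv track=rewrite | github.com/bishop-l-walker-usps/icda-prototype | icda/utils/resilience.py | sanitize_address_input
-- ===== SOURCE A (Python) =====
-- def sanitize_address_input(
--     address: str,
--     max_length: int = 500,
--     strip_control_chars: bool = True,
-- ) -> str:
--     """Sanitize address input before processing.
--
--     Args:
--         address: Raw address input
--         max_length: Maximum allowed length
--         strip_control_chars: Remove control characters
--
--     Returns:
--         Sanitized address string
--     """
--     if not address:
--         return ""
--
--     # Truncate to max length
--     result = address[:max_length]
--
--     # Strip control characters (keep printable ASCII and common Unicode)
--     if strip_control_chars:
--         result = "".join(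
--             char for char in result
--             if char.isprintable() or char in (" ", "\t")
--         )
--
--     # Normalize whitespace
--     result = " ".join(result.split())
--
--     return result.strip()
-- ===== SOURCE B (Python) =====
-- def sanitize_address_input(
--     address: str,
--     max_length: int = 500,
--     strip_control_chars: bool = True,
-- ) -> str:
--     """Single-pass state machine: truncate, then one loop that filters
--     control chars and collapses whitespace runs via a pending-space flag."""
--     out = []
--     pending = False
--     for ch in address[:max_length]:
--         if strip_control_chars and not (ch.isprintable() or ch in (" ", "\t")):
--             continue
--         if ch.isspace():
--             pending = bool(out)
--         elif pending:
--             out.append(" ")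
--             out.append(ch)
--             pending = False
--         else:
--             out.append(ch)
--     return "".join(out)
-- ===== Notes on version B (the rewrite author's own statement) =====
-- stated objective: alternative
-- what changed: Replaced A's multi-pass library pipeline (slice, filter-comprehension, split, join, strip) by a single fused loop over the truncated string that filters control characters and collapses whitespace with a pending-space state flag, building the output once.
import Mathlib
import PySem

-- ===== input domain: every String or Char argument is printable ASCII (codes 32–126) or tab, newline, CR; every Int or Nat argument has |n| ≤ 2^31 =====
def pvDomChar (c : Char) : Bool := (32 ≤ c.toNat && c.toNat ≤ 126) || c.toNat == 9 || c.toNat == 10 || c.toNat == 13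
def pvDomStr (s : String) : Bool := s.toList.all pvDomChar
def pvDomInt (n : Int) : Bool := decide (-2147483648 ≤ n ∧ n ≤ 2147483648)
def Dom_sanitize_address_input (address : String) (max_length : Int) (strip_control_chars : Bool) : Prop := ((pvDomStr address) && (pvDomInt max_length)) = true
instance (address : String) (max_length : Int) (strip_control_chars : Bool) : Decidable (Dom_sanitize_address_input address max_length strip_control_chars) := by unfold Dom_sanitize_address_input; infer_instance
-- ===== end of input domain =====

-- B replaces A's multi-pass pipeline (slice / filter-comprehension / split / join / strip) by one
-- fused state-machine loop over the truncated string; same cost, different decomposition.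


-- char.isprintable(), ported by hand: exact on the Dom charset (printable ASCII 32–126 → true;
-- tab/newline/CR → false), which is all the behavioural claim covers.
def pyIsPrintable (c : Char) : Bool := 32 ≤ c.toNat && c.toNat ≤ 126

-- ===== PORT A =====
def sanitize_address_input (address : String) (max_length : Int) (strip_control_chars : Bool) : String :=
  if address == "" then ""                                   -- if not address: return ""
  else
    -- result = address[:max_length]
    let result := PySem.List.slice address.toList none (some max_length)
    -- if strip_control_chars: result = "".join(c for c in result if c.isprintable() or c in (" ", "\t"))
    let result := if strip_control_chars then
        result.filter (fun c => pyIsPrintable c || c == ' ' || c == '\t')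
      else result
    -- result = " ".join(result.split())
    let result := PySem.Chars.join [' '] (PySem.Chars.split₀ result)
    -- return result.strip()
    String.ofList (PySem.Chars.strip result)

-- ===== PORT B =====
-- the single loop of Source B: out is the emitted character list, pending the pending-space flag
def altGo (strip : Bool) : List Char → List Char → Bool → List Char
  | [], out, _ => out
  | c :: rest, out, pending =>
    if strip && !(pyIsPrintable c || c == ' ' || c == '\t') then altGo strip rest out pending
    else if PySem.Chars.isspace c then altGo strip rest out (!out.isEmpty)
    else if pending then altGo strip rest (out ++ [' ', c]) false
    else altGo strip rest (out ++ [c]) false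

def sanitize_address_input_alt (address : String) (max_length : Int) (strip_control_chars : Bool) : String :=
  String.ofList (altGo strip_control_chars
    (PySem.List.slice address.toList none (some max_length)) [] false)

-- ===== PRECONDITION & SPEC =====
def Spec_sanitize_address_input (address : String) (max_length : Int) (strip_control_chars : Bool) (out : String) : Prop := out = sanitize_address_input_alt address max_length strip_control_chars
instance (address : String) (max_length : Int) (strip_control_chars : Bool) (out : String) : Decidable (Spec_sanitize_address_input address max_length strip_control_chars out) := by unfold Spec_sanitize_address_input; infer_instance

-- ===== CLAIM (what is proved, stated in full; the proofs are below) =====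
def Claim_equal_sanitize_address_input : Prop := ∀ (address : String) (max_length : Int) (strip_control_chars : Bool), Dom_sanitize_address_input address max_length strip_control_chars → Spec_sanitize_address_input address max_length strip_control_chars (sanitize_address_input address max_length strip_control_chars)

-- ===== LEMMAS AND PROOFS =====

-- fusing B's in-loop control-char filter with A's up-front filter pass
lemma altGo_filter (cs : List Char) : ∀ (out : List Char) (p : Bool),
    altGo true cs out p
      = altGo false (cs.filter (fun c => pyIsPrintable c || c == ' ' || c == '\t')) out p := by
  induction cs with
  | nil => intro out p; rfl
  | cons c rest ih =>
    intro out p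
    by_cases hk : (pyIsPrintable c || c == ' ' || c == '\t') = true
    · simp [altGo, hk, ih]
    · simp [altGo, hk, ih]

-- join " " over a snoc'd word list
lemma join_append_singleton (ws : List (List Char)) (w : List Char) (h : ws ≠ []) :
    PySem.Chars.join [' '] (ws ++ [w]) = PySem.Chars.join [' '] ws ++ ' ' :: w := by
  induction ws with
  | nil => simp at h
  | cons a rest ih =>
    cases rest with
    | nil => simp [PySem.Chars.join_singleton, PySem.Chars.join_cons_cons]
    | cons b rest' =>
      have := ih (by simp)
      simp only [List.cons_append, PySem.Chars.join_cons_cons] at *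
      simp [this]

lemma join_ne_nil (ws : List (List Char)) (h : ws ≠ []) (hw : ∀ w ∈ ws, w ≠ []) :
    PySem.Chars.join [' '] ws ≠ [] := by
  cases ws with
  | nil => simp at h
  | cons a rest =>
    cases rest with
    | nil => simpa [PySem.Chars.join_singleton] using hw a (by simp)
    | cons b rest' =>
      have ha := hw a (by simp)
      simp [PySem.Chars.join_cons_cons]

-- extending the last word by one character commutes with join
lemma join_snoc_snoc (ws : List (List Char)) (w : List Char) (c : Char) :
    PySem.Chars.join [' '] (ws ++ [w]) ++ [c] = PySem.Chars.join [' '] (ws ++ [w ++ [c]]) := by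
  cases ws with
  | nil => simp [PySem.Chars.join_singleton]
  | cons a rest =>
    rw [join_append_singleton _ _ (by simp), join_append_singleton _ _ (by simp)]
    simp

-- every word split₀.go produces is nonempty and space-free
lemma split₀_go_words (cs : List Char) : ∀ (cur : List Char) (acc : List (List Char)),
    (∀ w ∈ acc, w ≠ [] ∧ ∀ c ∈ w, PySem.Chars.isspace c = false) →
    (∀ c ∈ cur, PySem.Chars.isspace c = false) →
    ∀ w ∈ PySem.Chars.split₀.go cs cur acc, w ≠ [] ∧ ∀ c ∈ w, PySem.Chars.isspace c = false := by
  induction cs with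
  | nil =>
    intro cur acc hacc hcur
    by_cases hc : cur = []
    · subst hc; simpa [PySem.Chars.split₀.go] using fun w hw => hacc w hw
    · simp [PySem.Chars.split₀.go, List.isEmpty_iff, hc]
      rintro w (hw | hw)
      · exact hacc w hw
      · subst hw
        refine ⟨by simpa using hc, ?_⟩
        intro c hc'; exact hcur c (by simpa using hc')
  | cons c rest ih =>
    intro cur acc hacc hcur
    by_cases hs : PySem.Chars.isspace c = true
    · by_cases hc : cur = []
      · subst hc
        simpa [PySem.Chars.split₀.go, hs] using ih [] acc hacc (by simp)
      · simp only [PySem.Chars.split₀.go, hs, if_pos, List.isEmpty_iff, hc]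
        refine ih [] (cur.reverse :: acc) ?_ (by simp)
        intro w hw
        rcases List.mem_cons.mp hw with h | h
        · subst h
          exact ⟨by simpa using hc, fun d hd => hcur d (by simpa using hd)⟩
        · exact hacc w h
    · simp only [PySem.Chars.split₀.go, hs, Bool.false_eq_true, if_false]
      refine ih (c :: cur) acc hacc ?_
      intro d hd
      rcases List.mem_cons.mp hd with h | h
      · subst h; simpa using hs
      · exact hcur d h

-- the last character of the joined word list is not whitespace
lemma join_reverse_head (ws : List (List Char)) (h : ws ≠ [])
    (hw : ∀ w ∈ ws, w ≠ [] ∧ ∀ c ∈ w, PySem.Chars.isspace c = false) :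
    ∃ c t, (PySem.Chars.join [' '] ws).reverse = c :: t ∧ PySem.Chars.isspace c = false := by
  induction ws with
  | nil => simp at h
  | cons a rest ih =>
    cases rest with
    | nil =>
      obtain ⟨ha, hsp⟩ := hw a (by simp)
      rcases hr : a.reverse with _ | ⟨c, t⟩
      · exact absurd (by simpa using hr) ha
      · exact ⟨c, t, by simp [PySem.Chars.join_singleton, hr],
          hsp c (by rw [← List.mem_reverse, hr]; simp)⟩
    | cons b rest' =>
      obtain ⟨c, t, hrev, hc⟩ := ih (by simp) (fun w hw' => hw w (by simp [hw']))
      refine ⟨c, t ++ ' ' :: a.reverse, ?_, hc⟩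
      simp [PySem.Chars.join_cons_cons, hrev]

-- stripping the joined word list is a no-op
lemma strip_join (ws : List (List Char))
    (h : ∀ w ∈ ws, w ≠ [] ∧ ∀ c ∈ w, PySem.Chars.isspace c = false) :
    PySem.Chars.strip (PySem.Chars.join [' '] ws) = PySem.Chars.join [' '] ws := by
  cases ws with
  | nil => simp [PySem.Chars.join_nil, PySem.Chars.strip, PySem.Chars.lstrip, PySem.Chars.rstrip]
  | cons a rest =>
    have hls : PySem.Chars.lstrip (PySem.Chars.join [' '] (a :: rest))
        = PySem.Chars.join [' '] (a :: rest) := by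
      obtain ⟨ha, hsp⟩ := h a (by simp)
      rcases hha : a with _ | ⟨c, t⟩
      · exact absurd hha ha
      · have hc : PySem.Chars.isspace c = false := hsp c (by simp [hha])
        cases rest with
        | nil => simp [PySem.Chars.join_singleton, PySem.Chars.lstrip, hc]
        | cons b rest' =>
          simp [PySem.Chars.join_cons_cons, PySem.Chars.lstrip, hc]
    obtain ⟨c, t, hrev, hc⟩ := join_reverse_head (a :: rest) (by simp) h
    simp [PySem.Chars.strip, hls, PySem.Chars.rstrip, hrev, hc,
      ← List.reverse_eq_iff.mp hrev]

-- the loop invariant: B's state machine tracks split₀.go word by word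
lemma altGo_inv (cs : List Char) :
    (∀ acc : List (List Char), (∀ w ∈ acc, w ≠ []) →
      altGo false cs (PySem.Chars.join [' '] acc.reverse) (!acc.isEmpty)
        = PySem.Chars.join [' '] (PySem.Chars.split₀.go cs [] acc))
    ∧ (∀ (acc : List (List Char)) (cur : List Char), (∀ w ∈ acc, w ≠ []) → cur ≠ [] →
      altGo false cs (PySem.Chars.join [' '] (acc.reverse ++ [cur.reverse])) false
        = PySem.Chars.join [' '] (PySem.Chars.split₀.go cs cur acc)) := by
  induction cs with
  | nil =>
    constructor
    · intro acc _
      simp [altGo, PySem.Chars.split₀.go]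
    · intro acc cur _ hcur
      simp [altGo, PySem.Chars.split₀.go, List.isEmpty_iff, hcur]
  | cons c rest ih =>
    obtain ⟨ihU, ihS⟩ := ih
    constructor
    · intro acc hacc
      by_cases hs : PySem.Chars.isspace c = true
      · have hpe : (PySem.Chars.join [' '] acc.reverse).isEmpty = acc.isEmpty := by
          cases acc with
          | nil => simp [PySem.Chars.join_nil]
          | cons a acc' =>
            have hne : PySem.Chars.join [' '] ((a :: acc').reverse) ≠ [] :=
              join_ne_nil _ (by simp) (fun w hw => hacc w (List.mem_reverse.mp hw))
            simp only [List.reverse_cons] at hne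
            simp [List.isEmpty_eq_false_iff, hne]
        simp only [altGo, Bool.false_and, if_neg Bool.false_ne_true, hs, if_pos, hpe,
          PySem.Chars.split₀.go, List.isEmpty_nil]
        exact ihU acc hacc
      · simp only [altGo, Bool.false_and, if_neg Bool.false_ne_true, hs,
          Bool.false_eq_true, if_false, PySem.Chars.split₀.go]
        cases acc with
        | nil =>
          simpa [PySem.Chars.join_nil, PySem.Chars.join_singleton] using
            ihS [] [c] (by simp) (by simp)
        | cons a acc' =>
          have hne : ((a :: acc').reverse : List (List Char)) ≠ [] := by simp
          have h1 := join_append_singleton ((a :: acc').reverse) [c] hne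
          simp only [List.isEmpty_cons, Bool.not_false, if_pos]
          rw [show PySem.Chars.join [' '] ((a :: acc').reverse) ++ [' ', c]
              = PySem.Chars.join [' '] ((a :: acc').reverse) ++ ' ' :: [c] from by simp, ← h1]
          exact ihS (a :: acc') [c] hacc (by simp)
    · intro acc cur hacc hcur
      by_cases hs : PySem.Chars.isspace c = true
      · have hne : (PySem.Chars.join [' '] (acc.reverse ++ [cur.reverse])) ≠ [] := by
          refine join_ne_nil _ (by simp) ?_
          intro w hw
          rcases List.mem_append.mp hw with h | h
          · exact hacc w (by simpa using h)
          · simp at h; subst h; simpa using hcur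
        simp only [altGo, Bool.false_and, if_neg Bool.false_ne_true, hs, if_pos,
          PySem.Chars.split₀.go, List.isEmpty_iff, if_neg hcur, List.isEmpty_eq_false_iff.mpr hne,
          Bool.not_false]
        have := ihU (cur.reverse :: acc) (by
          intro w hw
          rcases List.mem_cons.mp hw with h | h
          · subst h; simpa using hcur
          · exact hacc w h)
        simpa using this
      · simp only [altGo, Bool.false_and, if_neg Bool.false_ne_true, hs,
          Bool.false_eq_true, if_false, PySem.Chars.split₀.go]
        rw [join_snoc_snoc]
        have := ihS acc (c :: cur) hacc (by simp)
        simpa using this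

-- B's loop from the start state computes " ".join(cs.split())
lemma altGo_eq_join_split (cs : List Char) :
    altGo false cs [] false = PySem.Chars.join [' '] (PySem.Chars.split₀ cs) := by
  have := (altGo_inv cs).1 [] (by simp)
  simpa [PySem.Chars.join_nil, PySem.Chars.split₀] using this

-- ===== VERDICT (by name: the statement is the Claim_ definition above) =====
theorem sanitize_address_input_spec : Claim_equal_sanitize_address_input := by
  intro address max_length strip_control_chars _
  unfold Spec_sanitize_address_input sanitize_address_input sanitize_address_input_alt
  by_cases h : address = ""
  · subst h
    simp [PySem.List.slice]
    rfl
  · have hfuse : ∀ cs : List Char, altGo strip_control_chars cs [] false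
        = altGo false (if strip_control_chars then
            cs.filter (fun c => pyIsPrintable c || c == ' ' || c == '\t') else cs) [] false := by
      intro cs; cases strip_control_chars
      · simp
      · simpa using altGo_filter cs [] false
    have hstrip : ∀ cs : List Char,
        PySem.Chars.strip (PySem.Chars.join [' '] (PySem.Chars.split₀ cs))
          = PySem.Chars.join [' '] (PySem.Chars.split₀ cs) := by
      intro cs
      exact strip_join _ (split₀_go_words cs [] [] (by simp) (by simp))
    simp only [if_neg (by simpa using h)]
    rw [hstrip, hfuse, altGo_eq_join_split]
    cases strip_control_chars <;> simp [h]
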